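-- pv_equiv track=rewrite | github.com/Cycyber/CCPS109---Computer-Science-1 | labs109.py | pyramid_blocks
-- ===== SOURCE A (Python) =====
-- def pyramid_blocks(n, m, h):
--     # n*m gets bigger, while h gets lower
--     # wolfram solution Sum[(n+i)(m+i), {i, 0, h-1}]
--     spheres = 0
--     while h > 0:
--         spheres = spheres + (n * m)
--         h -= 1
--         n += 1
--         m += 1
--     return spheres
-- ===== SOURCE B (Python) =====
-- def pyramid_blocks(n, m, h):
--     if h <= 0:
--         return 0
--     return h*n*m + (n+m)*(h*(h-1)//2) + (h-1)*h*(2*h-1)//6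
-- ===== Notes on version B (the rewrite author's own statement) =====
-- stated objective: faster
-- what changed: Replaced the O(h) while-loop accumulation with the closed-form polynomial h*n*m + (n+m)*h*(h-1)/2 + (h-1)*h*(2h-1)/6 for the sum.
import Mathlib
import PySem

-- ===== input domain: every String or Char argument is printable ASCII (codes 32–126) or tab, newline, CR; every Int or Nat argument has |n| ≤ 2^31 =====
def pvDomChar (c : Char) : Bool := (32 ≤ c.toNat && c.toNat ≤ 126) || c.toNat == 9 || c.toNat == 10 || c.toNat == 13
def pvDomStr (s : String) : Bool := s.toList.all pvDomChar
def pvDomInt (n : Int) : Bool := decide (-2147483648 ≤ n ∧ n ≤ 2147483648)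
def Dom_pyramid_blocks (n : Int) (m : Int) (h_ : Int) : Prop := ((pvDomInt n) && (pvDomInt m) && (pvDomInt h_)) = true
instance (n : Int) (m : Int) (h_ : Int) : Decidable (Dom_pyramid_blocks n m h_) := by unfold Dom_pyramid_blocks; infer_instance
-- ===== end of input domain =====

-- B replaces A's O(h) accumulation loop by the closed-form polynomial (objective: faster, asymptotic).
-- ===== PORT A =====
-- the while loop of A: state (spheres, n, m, h_), one recursive call per iteration
def pyramidA_loop (spheres : Int) (n : Int) (m : Int) (h_ : Int) : Int :=
  if h_ > 0 then pyramidA_loop (spheres + n * m) (n + 1) (m + 1) (h_ - 1) else spheres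
termination_by h_.toNat
decreasing_by omega

def pyramid_blocks (n : Int) (m : Int) (h_ : Int) : Int :=
  pyramidA_loop 0 n m h_

-- ===== PORT B =====
def pyramid_blocks_alt (n : Int) (m : Int) (h_ : Int) : Int :=
  if h_ ≤ 0 then 0
  else h_ * n * m + (n + m) * (PySem.Int.floordiv (h_ * (h_ - 1)) 2)
       + PySem.Int.floordiv ((h_ - 1) * h_ * (2 * h_ - 1)) 6

-- ===== PRECONDITION & SPEC =====
def Spec_pyramid_blocks (n : Int) (m : Int) (h_ : Int) (out : Int) : Prop := out = pyramid_blocks_alt n m h_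
instance (n : Int) (m : Int) (h_ : Int) (out : Int) : Decidable (Spec_pyramid_blocks n m h_ out) := by unfold Spec_pyramid_blocks; infer_instance

-- ===== CLAIM (what is proved, stated in full; the proofs are below) =====
def Claim_equal_pyramid_blocks : Prop := ∀ (n : Int) (m : Int) (h_ : Int), Dom_pyramid_blocks n m h_ → Spec_pyramid_blocks n m h_ (pyramid_blocks n m h_)

-- ===== LEMMAS AND PROOFS =====

-- ===== VERDICT (by name: the statement is the Claim_ definition above) =====
lemma pyramidA_loop_six (k : Nat) : ∀ s n m : Int,
    6 * pyramidA_loop s n m (k : Int) =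
      6 * s + 6 * (k : Int) * n * m + 3 * (n + m) * (k : Int) * ((k : Int) - 1)
        + ((k : Int) - 1) * (k : Int) * (2 * (k : Int) - 1) := by
  induction k with
  | zero => intro s n m; rw [pyramidA_loop]; norm_num
  | succ k ih =>
    intro s n m
    rw [pyramidA_loop]
    have hpos : ((k + 1 : Nat) : Int) > 0 := by positivity
    rw [if_pos hpos]
    have : ((k + 1 : Nat) : Int) - 1 = (k : Int) := by push_cast; ring
    rw [this, ih]
    push_cast
    ring

lemma dvd_two (h : Int) : 2 ∣ h * (h - 1) := by
  have := Int.even_mul_succ_self (h - 1)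
  have h2 : (h - 1) * (h - 1 + 1) = h * (h - 1) := by ring
  rw [h2] at this
  exact this.two_dvd

lemma dvd_six (h : Int) : 6 ∣ (h - 1) * h * (2 * h - 1) := by
  obtain ⟨q, r, hr0, hr6, rfl⟩ : ∃ q r : Int, 0 ≤ r ∧ r < 6 ∧ h = 6 * q + r :=
    ⟨h / 6, h % 6, Int.emod_nonneg _ (by norm_num), Int.emod_lt_of_pos _ (by norm_num),
      by rw [Int.ediv_add_emod]⟩
  interval_cases r
  · exact ⟨(0) * 1 + (1) * q + (-18) * q*q + (72) * q*q*q, by ring⟩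
  · exact ⟨(0) * 1 + (1) * q + (18) * q*q + (72) * q*q*q, by ring⟩
  · exact ⟨(1) * 1 + (13) * q + (54) * q*q + (72) * q*q*q, by ring⟩
  · exact ⟨(5) * 1 + (37) * q + (90) * q*q + (72) * q*q*q, by ring⟩
  · exact ⟨(14) * 1 + (73) * q + (126) * q*q + (72) * q*q*q, by ring⟩
  · exact ⟨(30) * 1 + (121) * q + (162) * q*q + (72) * q*q*q, by ring⟩

lemma fdiv_cancel {a b : Int} (hb : 0 < b) (hd : b ∣ a) :
    b * PySem.Int.floordiv a b = a := by
  rw [PySem.Int.floordiv_eq_ediv_of_pos hb]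
  exact Int.mul_ediv_cancel' hd

theorem pyramid_blocks_spec : Claim_equal_pyramid_blocks := by
  intro n m h_ _
  unfold Spec_pyramid_blocks pyramid_blocks pyramid_blocks_alt
  by_cases hh : h_ ≤ 0
  · rw [pyramidA_loop, if_neg (by omega), if_pos hh]
  · rw [if_neg hh]
    have hk : h_ = ((h_.toNat : Nat) : Int) := by omega
    have h6 := pyramidA_loop_six h_.toNat 0 n m
    rw [← hk] at h6
    have hB : 6 * (h_ * n * m + (n + m) * (PySem.Int.floordiv (h_ * (h_ - 1)) 2)
        + PySem.Int.floordiv ((h_ - 1) * h_ * (2 * h_ - 1)) 6) =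
        6 * 0 + 6 * h_ * n * m + 3 * (n + m) * h_ * (h_ - 1)
          + (h_ - 1) * h_ * (2 * h_ - 1) := by
      have e2 := fdiv_cancel (a := h_ * (h_ - 1)) (by norm_num : (0:Int) < 2) (dvd_two h_)
      have e6 := fdiv_cancel (a := (h_ - 1) * h_ * (2 * h_ - 1)) (by norm_num : (0:Int) < 6) (dvd_six h_)
      linear_combination 3 * (n + m) * e2 + e6
    have := h6.trans hB.symm
    exact mul_left_cancel₀ (by norm_num : (6:Int) ≠ 0) this
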